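-- pv_equiv track=rewrite | github.com/ashaduzzaman-sarker/Fintech-Rag | app/ingestion/chunkers.py | _preserve_tables
-- ===== SOURCE A (Python) =====
-- def _preserve_tables(text: str) -> str:
--     """
--     Detect financial tables and try to keep them together.
--     Adds extra newlines to discourage splitting.
--     """
--
--     # Simple heuristic: lines with multiple | or tab separators
--     lines = text.split("\n")
--     in_table = False
--     result = []
--
--     for line in lines:
--         # Detect table-like content
--         if line.count("|") >= 2 or line.count("\t") >= 2:
--             if not in_table:
--                 result.append("\n\n")  # Add break before table
--                 in_table = True
--             result.append(line)
--         else: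
--             if in_table:
--                 result.append("\n\n")  # Add break after table
--                 in_table = False
--             result.append(line)
--
--     return "\n".join(result)
-- ===== SOURCE B (Python) =====
-- def _is_table_line(line: str) -> bool:
--     return line.count("|") >= 2 or line.count("\t") >= 2
--
--
-- def _preserve_tables(text: str) -> str:
--     """Run-based rewrite: split into maximal runs of table/non-table lines,
--     join each run once, and emit a "\n\n" piece at every run boundary
--     (and before the first run when it is a table run)."""
--     lines = text.split("\n")
--     pieces = []
--     i, n = 0, len(lines)
--     while i < n:
--         f = _is_table_line(lines[i])
--         j = i + 1
--         while j < n and _is_table_line(lines[j]) == f: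
--             j += 1
--         if pieces or f:
--             pieces.append("\n\n")
--         pieces.append("\n".join(lines[i:j]))
--         i = j
--     return "\n".join(pieces)
-- ===== Notes on version B (the rewrite author's own statement) =====
-- stated objective: alternative
-- what changed: Replaces A's per-line boolean state machine (in_table flag toggled line by line, break tokens interleaved into a flat token list) by a run-based decomposition: find each maximal run of equally-classified lines, join the run once, and emit a break piece exactly at run boundaries (plus a leading break when the first run is a table run).
import Mathlib
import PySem

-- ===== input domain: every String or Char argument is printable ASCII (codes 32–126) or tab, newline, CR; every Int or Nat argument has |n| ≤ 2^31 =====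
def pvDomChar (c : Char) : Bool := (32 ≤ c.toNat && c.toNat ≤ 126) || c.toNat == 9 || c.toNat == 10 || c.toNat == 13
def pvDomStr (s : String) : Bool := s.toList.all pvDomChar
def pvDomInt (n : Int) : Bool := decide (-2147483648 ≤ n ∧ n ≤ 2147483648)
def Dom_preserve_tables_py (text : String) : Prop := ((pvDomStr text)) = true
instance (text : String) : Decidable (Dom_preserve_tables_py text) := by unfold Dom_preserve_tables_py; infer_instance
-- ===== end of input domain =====

-- B replaces A's per-line in_table state machine by a run-based decomposition
-- (maximal runs of table/non-table lines, one break piece per run boundary); same cost, different structure.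


-- ===== PORT A =====
-- literal port of A: fold over the lines carrying (in_table, result), then "\n".join
def preserve_tables_py (text : String) : String :=
  let lines := (PySem.Str.split? text "\n").getD []   -- sep is the non-empty literal "\n", so split? is always `some`
  let st := lines.foldl (fun (st : Bool × List String) line =>
    if PySem.Str.count line "|" ≥ 2 ∨ PySem.Str.count line "\t" ≥ 2 then
      if !st.1 then (true, st.2 ++ ["\n\n", line]) else (true, st.2 ++ [line])
    else
      if st.1 then (false, st.2 ++ ["\n\n", line]) else (false, st.2 ++ [line]))
    (false, [])
  PySem.Str.join "\n" st.2

-- ===== PORT B =====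
def pvIsTableLine (line : String) : Bool :=
  decide (PySem.Str.count line "|" ≥ 2) || decide (PySem.Str.count line "\t" ≥ 2)

-- B's outer while loop: consume one maximal run per step (the inner while is the takeWhile/dropWhile scan)
def pvRunsLoop (pieces : List String) : List String → List String
  | [] => pieces
  | l :: rest =>
    let f := pvIsTableLine l
    let run := l :: rest.takeWhile (fun x => pvIsTableLine x == f)
    let rest' := rest.dropWhile (fun x => pvIsTableLine x == f)
    pvRunsLoop (pieces ++ (if pieces ≠ [] ∨ f then ["\n\n"] else []) ++ [PySem.Str.join "\n" run]) rest'
  termination_by ls => ls.length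
  decreasing_by
    simpa using Nat.lt_succ_of_le (List.length_dropWhile_le (fun x => pvIsTableLine x == pvIsTableLine l) rest)

def preserve_tables_py_alt (text : String) : String :=
  let lines := (PySem.Str.split? text "\n").getD []
  PySem.Str.join "\n" (pvRunsLoop [] lines)

-- ===== PRECONDITION & SPEC =====
def Spec_preserve_tables_py (text : String) (out : String) : Prop := out = preserve_tables_py_alt text
instance (text : String) (out : String) : Decidable (Spec_preserve_tables_py text out) := by unfold Spec_preserve_tables_py; infer_instance

-- ===== CLAIM (what is proved, stated in full; the proofs are below) =====
def Claim_equal_preserve_tables_py : Prop := ∀ (text : String), Dom_preserve_tables_py text → Spec_preserve_tables_py text (preserve_tables_py text)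

-- ===== LEMMAS AND PROOFS =====

-- A's loop, rephrased as structural recursion emitting the tokens appended from state b onward
def pvALoop : List String → Bool → List String
  | [], _ => []
  | l :: ls, b =>
    if pvIsTableLine l then
      (if b then [l] else ["\n\n", l]) ++ pvALoop ls true
    else
      (if b then ["\n\n", l] else [l]) ++ pvALoop ls false

theorem pvFold_eq_aloop (ls : List String) : ∀ (b : Bool) (res : List String),
    (ls.foldl (fun (st : Bool × List String) line =>
      if 2 ≤ PySem.Chars.count line.toList ['|'] ∨ 2 ≤ PySem.Chars.count line.toList ['\t'] then
        if st.1 = false then ((true : Bool), st.2 ++ ["\n\n", line]) else (true, st.2 ++ [line])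
      else
        if st.1 = true then ((false : Bool), st.2 ++ ["\n\n", line]) else (false, st.2 ++ [line]))
      (b, res)).2 = res ++ pvALoop ls b := by
  induction ls with
  | nil => intro b res; simp [pvALoop]
  | cons l ls ih =>
    intro b res
    by_cases hf : 2 ≤ PySem.Chars.count l.toList ['|'] ∨ 2 ≤ PySem.Chars.count l.toList ['\t']
    · have hft : pvIsTableLine l = true := by
        unfold pvIsTableLine
        rcases hf with h | h <;> simp [h]
      cases b <;> simp [List.foldl_cons, hf, hft, pvALoop, ih]
    · have hff : pvIsTableLine l = false := by
        unfold pvIsTableLine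
        rcases not_or.mp hf with ⟨h1, h2⟩
        simp [h1, h2]
      cases b <;> simp [List.foldl_cons, hf, hff, pvALoop, ih]

-- A's fold as written in the port (Python-string primitives), reduced to the lemma above
theorem pvFold_eq_aloop_str (ls : List String) (b : Bool) (res : List String) :
    (ls.foldl (fun (st : Bool × List String) line =>
      if PySem.Str.count line "|" ≥ 2 ∨ PySem.Str.count line "\t" ≥ 2 then
        if !st.1 then ((true : Bool), st.2 ++ ["\n\n", line]) else (true, st.2 ++ [line])
      else
        if st.1 then ((false : Bool), st.2 ++ ["\n\n", line]) else (false, st.2 ++ [line]))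
      (b, res)).2 = res ++ pvALoop ls b := by
  have hfun : (fun (st : Bool × List String) line =>
      if PySem.Str.count line "|" ≥ 2 ∨ PySem.Str.count line "\t" ≥ 2 then
        if !st.1 then ((true : Bool), st.2 ++ ["\n\n", line]) else (true, st.2 ++ [line])
      else
        if st.1 then ((false : Bool), st.2 ++ ["\n\n", line]) else (false, st.2 ++ [line]))
      = (fun (st : Bool × List String) line =>
      if 2 ≤ PySem.Chars.count line.toList ['|'] ∨ 2 ≤ PySem.Chars.count line.toList ['\t'] then
        if st.1 = false then ((true : Bool), st.2 ++ ["\n\n", line]) else (true, st.2 ++ [line])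
      else
        if st.1 = true then ((false : Bool), st.2 ++ ["\n\n", line]) else (false, st.2 ++ [line])) := by
    funext st line
    by_cases h : 2 ≤ PySem.Chars.count line.toList ['|'] ∨ 2 ≤ PySem.Chars.count line.toList ['\t'] <;>
      cases hst : st.1 <;> simp [h, hst]
  rw [hfun]
  exact pvFold_eq_aloop ls b res

-- A's loop walks straight through a homogeneous run
theorem pvALoop_run (run : List String) (f : Bool) (h : ∀ x ∈ run, pvIsTableLine x = f) (rest : List String) :
    pvALoop (run ++ rest) f = run ++ pvALoop rest f := by
  induction run with
  | nil => simp
  | cons x xs ih =>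
    have hx : pvIsTableLine x = f := h x (by simp)
    have hxs : ∀ y ∈ xs, pvIsTableLine y = f := fun y hy => h y (by simp [hy])
    cases f <;> simp [pvALoop, hx, ih hxs]

-- a joined nonempty run, as an element of a join with the same separator, collapses
theorem pvCharsJoinJoin (sep : List Char) (run : List (List Char)) (h : run ≠ []) (ys : List (List Char)) :
    PySem.Chars.join sep (PySem.Chars.join sep run :: ys) = PySem.Chars.join sep (run ++ ys) := by
  induction run with
  | nil => exact absurd rfl h
  | cons r rs ih =>
    cases rs with
    | nil =>
      cases ys with
      | nil => simp [PySem.Chars.join_singleton]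
      | cons y ys' => simp [PySem.Chars.join_cons_cons, PySem.Chars.join_singleton]
    | cons r2 rs2 =>
      have ih2 := ih (by simp)
      cases ys with
      | nil => simp [PySem.Chars.join_singleton]
      | cons y ys' =>
        simp only [List.cons_append] at ih2 ⊢
        rw [PySem.Chars.join_cons_cons sep r r2 (rs2 ++ y :: ys'), ← ih2,
          PySem.Chars.join_cons_cons sep (PySem.Chars.join sep (r :: r2 :: rs2)) y ys',
          PySem.Chars.join_cons_cons sep r r2 rs2,
          PySem.Chars.join_cons_cons sep (PySem.Chars.join sep (r2 :: rs2)) y ys']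
        simp [List.append_assoc]

theorem pvCharsJoinJoin2 (sep : List Char) (xs : List (List Char)) (run : List (List Char)) (h : run ≠ []) (ys : List (List Char)) :
    PySem.Chars.join sep (xs ++ PySem.Chars.join sep run :: ys) = PySem.Chars.join sep (xs ++ (run ++ ys)) := by
  induction xs with
  | nil => simpa using pvCharsJoinJoin sep run h ys
  | cons a as ih =>
    cases has1 : as ++ PySem.Chars.join sep run :: ys with
    | nil => simp at has1
    | cons p ps =>
      cases has2 : as ++ (run ++ ys) with
      | nil =>
        cases run with
        | nil => exact absurd rfl h
        | cons u us => simp at has2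
      | cons q qs =>
        rw [List.cons_append, List.cons_append, has1, has2, PySem.Chars.join_cons_cons,
          PySem.Chars.join_cons_cons, ← has1, ← has2, ih]

theorem pvJoin_join (xs run : List String) (hrun : run ≠ []) (ys : List String) :
    PySem.Str.join "\n" (xs ++ PySem.Str.join "\n" run :: ys) = PySem.Str.join "\n" (xs ++ (run ++ ys)) := by
  have hmap : run.map String.toList ≠ [] := by
    cases run with
    | nil => exact absurd rfl hrun
    | cons a b => simp
  have h := pvCharsJoinJoin2 "\n".toList (xs.map String.toList) (run.map String.toList) hmap (ys.map String.toList)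
  apply String.toList_inj.mp
  simpa [PySem.Str.toList_join] using h

-- the invariant tying A's state to B's pieces at a run boundary
def pvInv (pieces : List String) (b : Bool) (ls : List String) : Prop :=
  ls = [] ∨ (pieces = [] ∧ b = false) ∨ (pieces ≠ [] ∧ ∀ l ls', ls = l :: ls' → pvIsTableLine l = !b)

theorem pvMain (n : Nat) : ∀ (ls : List String), ls.length ≤ n → ∀ (pieces : List String) (b : Bool),
    pvInv pieces b ls →
    PySem.Str.join "\n" (pieces ++ pvALoop ls b) = PySem.Str.join "\n" (pvRunsLoop pieces ls) := by
  induction n with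
  | zero =>
    intro ls hlen pieces b _
    have : ls = [] := List.length_eq_zero_iff.mp (Nat.le_zero.mp hlen)
    subst this
    simp [pvALoop, pvRunsLoop]
  | succ n ih =>
    intro ls hlen pieces b hinv
    cases ls with
    | nil => simp [pvALoop, pvRunsLoop]
    | cons l rest =>
      set f := pvIsTableLine l with hf
      set run0 := rest.takeWhile (fun x => pvIsTableLine x == f) with hrun0
      set rest' := rest.dropWhile (fun x => pvIsTableLine x == f) with hrest'
      -- the tokens A emits for the head line
      have hsep : pvALoop (l :: rest) b =
          (if pieces ≠ [] ∨ f then ["\n\n"] else []) ++ [l] ++ pvALoop rest f := by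
        rcases hinv with h | ⟨hp, hb⟩ | ⟨hp, hhead⟩
        · exact absurd h (by simp)
        · subst hb
          cases hft : f <;> simp [pvALoop, ← hf, hft, hp]
        · have hbf : f = !b := hhead l rest rfl
          cases hbt : b <;> rw [hbt] at hbf <;> simp [pvALoop, ← hf, hbf, hp]
      have hsplit : rest = run0 ++ rest' := (List.takeWhile_append_dropWhile).symm
      have hrunflags : ∀ x ∈ run0, pvIsTableLine x = f := by
        intro x hx
        have := List.mem_takeWhile_imp (hrun0 ▸ hx)
        simpa using this
      have hrest : pvALoop rest f = run0 ++ pvALoop rest' f := by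
        rw [hsplit]; exact pvALoop_run run0 f hrunflags rest'
      -- B's one step
      have hB : pvRunsLoop pieces (l :: rest) =
          pvRunsLoop (pieces ++ (if pieces ≠ [] ∨ f then ["\n\n"] else []) ++ [PySem.Str.join "\n" (l :: run0)]) rest' := by
        conv_lhs => rw [pvRunsLoop]
      -- invariant for the next step
      have hinv' : pvInv (pieces ++ (if pieces ≠ [] ∨ f then ["\n\n"] else []) ++ [PySem.Str.join "\n" (l :: run0)]) f rest' := by
        cases hr : rest' with
        | nil => exact Or.inl rfl
        | cons r rs =>
          refine Or.inr (Or.inr ⟨by simp, ?_⟩)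
          intro l2 ls2 heq
          have hhd := List.head_dropWhile_not (fun x => pvIsTableLine x == f) (l := rest)
          rw [← hrest', hr] at hhd
          simp only [List.head_cons] at hhd
          have hne : pvIsTableLine r ≠ f := by simpa using hhd (by simp)
          injection heq with h1 h2
          subst h1
          cases hft : f <;> rw [hft] at hne <;> simp at hne <;> simp [hne]
      have hlen' : rest'.length ≤ n := by
        have h1 : rest'.length ≤ rest.length := List.length_dropWhile_le _ _
        simp only [List.length_cons] at hlen
        omega
      have hIH := ih rest' hlen' _ f hinv'
      calc PySem.Str.join "\n" (pieces ++ pvALoop (l :: rest) b)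
          = PySem.Str.join "\n" ((pieces ++ (if pieces ≠ [] ∨ f then ["\n\n"] else [])) ++ ((l :: run0) ++ pvALoop rest' f)) := by
            rw [hsep, hrest]; simp [List.append_assoc]
        _ = PySem.Str.join "\n" ((pieces ++ (if pieces ≠ [] ∨ f then ["\n\n"] else [])) ++ PySem.Str.join "\n" (l :: run0) :: pvALoop rest' f) := by
            rw [pvJoin_join (pieces ++ (if pieces ≠ [] ∨ f then ["\n\n"] else [])) (l :: run0) (by simp) (pvALoop rest' f)]
        _ = PySem.Str.join "\n" (pvRunsLoop pieces (l :: rest)) := by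
            rw [hB, ← hIH]; simp [List.append_assoc]

-- ===== VERDICT (by name: the statement is the Claim_ definition above) =====
theorem preserve_tables_py_spec : Claim_equal_preserve_tables_py := by
  intro text _
  unfold Spec_preserve_tables_py preserve_tables_py preserve_tables_py_alt
  dsimp only
  rw [pvFold_eq_aloop_str]
  exact pvMain ((PySem.Str.split? text "\n").getD []).length _ le_rfl [] false (Or.inr (Or.inl ⟨rfl, rfl⟩))
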